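-- pv_equiv track=rewrite | github.com/F1u0rite/vlfm | my_vlfm/my_vlfm/goal_selector.py | _ring_cells
-- ===== SOURCE A (Python) =====
-- from typing import Tuple
--
-- def _ring_cells(center: Tuple[int, int], radius: int) -> Tuple[Tuple[int, int], ...]:
--     r0, c0 = center
--     if radius == 0:
--         return ((r0, c0),)
--     cells = []
--     for dr in range(-radius, radius + 1):
--         for dc in range(-radius, radius + 1):
--             if max(abs(dr), abs(dc)) == radius:
--                 cells.append((r0 + dr, c0 + dc))
--     return tuple(cells)
-- ===== SOURCE B (Python) =====
-- from typing import Tuple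
--
-- def _ring_cells(center: Tuple[int, int], radius: int) -> Tuple[Tuple[int, int], ...]:
--     # O(radius): emit only the boundary cells directly, row by row, in A's order.
--     r0, c0 = center
--     if radius == 0:
--         return ((r0, c0),)
--     top = [(r0 - radius, c0 + dc) for dc in range(-radius, radius + 1)]
--     mid = [cell for dr in range(-radius + 1, radius)
--            for cell in ((r0 + dr, c0 - radius), (r0 + dr, c0 + radius))]
--     bot = [(r0 + radius, c0 + dc) for dc in range(-radius, radius + 1)]
--     return tuple(top + mid + bot)
-- ===== Notes on version B (the rewrite author's own statement) =====
-- stated objective: faster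
-- what changed: Instead of scanning the full (2r+1)x(2r+1) square and filtering for Chebyshev distance exactly r, B builds the ring directly as top row + two side cells per middle row + bottom row, in the same order.
import Mathlib
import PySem

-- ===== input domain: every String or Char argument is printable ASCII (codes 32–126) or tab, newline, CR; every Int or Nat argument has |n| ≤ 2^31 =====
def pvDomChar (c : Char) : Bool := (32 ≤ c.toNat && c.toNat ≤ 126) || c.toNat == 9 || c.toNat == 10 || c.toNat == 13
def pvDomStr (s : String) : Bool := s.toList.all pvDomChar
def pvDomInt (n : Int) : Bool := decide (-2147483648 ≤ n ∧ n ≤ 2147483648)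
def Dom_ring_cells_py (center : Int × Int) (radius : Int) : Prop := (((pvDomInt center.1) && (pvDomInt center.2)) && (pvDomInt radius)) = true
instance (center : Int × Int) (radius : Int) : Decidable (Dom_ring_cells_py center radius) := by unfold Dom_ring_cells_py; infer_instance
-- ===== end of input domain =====

-- B replaces A's filtered scan of the full (2r+1)×(2r+1) square by direct emission of the
-- boundary cells (top row, two side cells per middle row, bottom row) in the same order: O(r) vs O(r²).

-- ===== PORT A =====
def ring_cells_py (center : Int × Int) (radius : Int) : List (Int × Int) :=
  let r0 := center.1
  let c0 := center.2
  if radius = 0 then [(r0, c0)]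
  else
    let cells : List (Int × Int) := []
    let cells := (PySem.List.pyRange (-radius) (radius + 1)).foldl (fun cells dr =>
      (PySem.List.pyRange (-radius) (radius + 1)).foldl (fun cells dc =>
        if max |dr| |dc| = radius then cells ++ [(r0 + dr, c0 + dc)] else cells) cells) cells
    cells

-- ===== PORT B =====
def ring_cells_py_alt (center : Int × Int) (radius : Int) : List (Int × Int) :=
  let r0 := center.1
  let c0 := center.2
  if radius = 0 then [(r0, c0)]
  else
    let top := (PySem.List.pyRange (-radius) (radius + 1)).map (fun dc => (r0 - radius, c0 + dc))
    let mid := (PySem.List.pyRange (-radius + 1) radius).flatMap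
      (fun dr => [(r0 + dr, c0 - radius), (r0 + dr, c0 + radius)])
    let bot := (PySem.List.pyRange (-radius) (radius + 1)).map (fun dc => (r0 + radius, c0 + dc))
    top ++ mid ++ bot

-- ===== PRECONDITION & SPEC =====
def Spec_ring_cells_py (center : Int × Int) (radius : Int) (out : List (Int × Int)) : Prop := out = ring_cells_py_alt center radius
instance (center : Int × Int) (radius : Int) (out : List (Int × Int)) : Decidable (Spec_ring_cells_py center radius out) := by unfold Spec_ring_cells_py; infer_instance

-- ===== CLAIM (what is proved, stated in full; the proofs are below) =====
def Claim_equal_ring_cells_py : Prop := ∀ (center : Int × Int) (radius : Int), Dom_ring_cells_py center radius → Spec_ring_cells_py center radius (ring_cells_py center radius)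

-- ===== LEMMAS AND PROOFS =====

-- A's result after flattening its two append-if loops into filter/map form.
theorem ringA_flatMap (r0 c0 radius : Int) (h : radius ≠ 0) :
    ring_cells_py (r0, c0) radius =
      (PySem.List.pyRange (-radius) (radius + 1)).flatMap (fun dr =>
        ((PySem.List.pyRange (-radius) (radius + 1)).filter
          (fun dc => decide (max |dr| |dc| = radius))).map (fun dc => (r0 + dr, c0 + dc))) := by
  unfold ring_cells_py
  simp only [if_neg h]
  have hinner : ∀ (dr : Int) (acc : List (Int × Int)),
      (PySem.List.pyRange (-radius) (radius + 1)).foldl (fun cells dc =>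
        if max |dr| |dc| = radius then cells ++ [(r0 + dr, c0 + dc)] else cells) acc
      = acc ++ ((PySem.List.pyRange (-radius) (radius + 1)).filter
          (fun dc => decide (max |dr| |dc| = radius))).map (fun dc => (r0 + dr, c0 + dc)) := by
    intro dr acc
    rw [← PySem.List.foldl_append_if (fun dc => decide (max |dr| |dc| = radius))
      (fun dc => (r0 + dr, c0 + dc))]
    simp
  simp only [hinner]
  rw [PySem.List.foldl_append_eq_flatMap]
  simp

-- The pyRange decomposition of the scanned square's side, for radius > 0.
theorem range_decomp (radius : Int) (h : 0 < radius) :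
    PySem.List.pyRange (-radius) (radius + 1) =
      [-radius] ++ PySem.List.pyRange (-radius + 1) radius ++ [radius] := by
  rw [PySem.List.pyRange_one_succ_right (by omega), PySem.List.pyRange_one_cons (by omega)]
  simp

-- In a row at Chebyshev distance radius from the center row, every scanned cell is kept.
theorem filter_full (radius dr : Int) (hdr : |dr| = radius) :
    (PySem.List.pyRange (-radius) (radius + 1)).filter
      (fun dc => decide (max |dr| |dc| = radius)) =
      PySem.List.pyRange (-radius) (radius + 1) := by
  apply List.filter_eq_self.mpr
  intro dc hdc
  rw [PySem.List.mem_pyRange_one] at hdc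
  rcases abs_cases dc with ⟨h1, _⟩ | ⟨h1, _⟩ <;> simp <;> omega

-- In a middle row, exactly the two side cells are kept.
theorem filter_sides (radius dr : Int) (h : 0 < radius) (hdr : |dr| < radius) :
    (PySem.List.pyRange (-radius) (radius + 1)).filter
      (fun dc => decide (max |dr| |dc| = radius)) = [-radius, radius] := by
  rw [range_decomp radius h]
  have hmid : ((PySem.List.pyRange (-radius + 1) radius).filter
      (fun dc => decide (max |dr| |dc| = radius))) = [] := by
    apply List.filter_eq_nil_iff.mpr
    intro dc hdc
    rw [PySem.List.mem_pyRange_one] at hdc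
    rcases abs_cases dc with ⟨h1, _⟩ | ⟨h1, _⟩ <;> simp <;> omega
  simp only [List.filter_append, hmid]
  have h2 : |radius| = radius := by rcases abs_cases radius with ⟨a, _⟩ | ⟨a, _⟩ <;> omega
  have h3 : max |dr| radius = radius := max_eq_right hdr.le
  simp [abs_neg, h2, h3]

theorem ring_eq_pos (r0 c0 radius : Int) (h : 0 < radius) :
    ring_cells_py (r0, c0) radius = ring_cells_py_alt (r0, c0) radius := by
  rw [ringA_flatMap r0 c0 radius (by omega)]
  unfold ring_cells_py_alt
  simp only [if_neg (show ¬ radius = 0 by omega)]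
  have habs : |(-radius)| = radius := by rcases abs_cases (-radius) with ⟨a, _⟩ | ⟨a, _⟩ <;> omega
  have habs' : |radius| = radius := by rcases abs_cases radius with ⟨a, _⟩ | ⟨a, _⟩ <;> omega
  set row : Int → List (Int × Int) := fun dr =>
    if |dr| = radius then (PySem.List.pyRange (-radius) (radius + 1)).map (fun dc => (r0 + dr, c0 + dc))
    else [(r0 + dr, c0 - radius), (r0 + dr, c0 + radius)] with hrowdef
  have hrow : ∀ dr ∈ PySem.List.pyRange (-radius) (radius + 1),
      ((PySem.List.pyRange (-radius) (radius + 1)).filter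
        (fun dc => decide (max |dr| |dc| = radius))).map (fun dc => (r0 + dr, c0 + dc)) = row dr := by
    intro dr hdr
    rw [PySem.List.mem_pyRange_one] at hdr
    by_cases hd : |dr| = radius
    · rw [filter_full radius dr hd, hrowdef]; simp [hd]
    · rw [filter_sides radius dr h (by rcases abs_cases dr with ⟨a, _⟩ | ⟨a, _⟩ <;> omega), hrowdef]
      simp [hd, sub_eq_add_neg]
  rw [List.flatMap_congr hrow]
  have hsplit : (PySem.List.pyRange (-radius) (radius + 1)).flatMap row =
      row (-radius) ++ (PySem.List.pyRange (-radius + 1) radius).flatMap row ++ [row radius].flatten := by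
    rw [range_decomp radius h]; simp [List.flatMap_append]
  rw [hsplit]
  have hmid : ∀ dr ∈ PySem.List.pyRange (-radius + 1) radius,
      row dr = [(r0 + dr, c0 - radius), (r0 + dr, c0 + radius)] := by
    intro dr hdr
    rw [PySem.List.mem_pyRange_one] at hdr
    have : ¬ |dr| = radius := by rcases abs_cases dr with ⟨a, _⟩ | ⟨a, _⟩ <;> omega
    simp [hrowdef, this]
  rw [List.flatMap_congr hmid]
  have e1 : row (-radius) = (PySem.List.pyRange (-radius) (radius + 1)).map
      (fun dc => (r0 - radius, c0 + dc)) := by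
    simp [hrowdef, habs, sub_eq_add_neg]
  have e2 : row radius = (PySem.List.pyRange (-radius) (radius + 1)).map
      (fun dc => (r0 + radius, c0 + dc)) := by
    simp [hrowdef, habs']
  rw [e1, e2]
  simp

theorem ring_eq_neg (r0 c0 radius : Int) (h : radius < 0) :
    ring_cells_py (r0, c0) radius = ring_cells_py_alt (r0, c0) radius := by
  unfold ring_cells_py ring_cells_py_alt
  simp only [if_neg (show ¬ radius = 0 by omega)]
  rw [PySem.List.pyRange_one_eq_nil (by omega), PySem.List.pyRange_one_eq_nil (by omega)]
  simp

-- ===== VERDICT (by name: the statement is the Claim_ definition above) =====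
theorem ring_cells_py_spec : Claim_equal_ring_cells_py := by
  intro center radius _
  unfold Spec_ring_cells_py
  obtain ⟨r0, c0⟩ := center
  rcases lt_trichotomy radius 0 with h | h | h
  · exact ring_eq_neg r0 c0 radius h
  · subst h; rfl
  · exact ring_eq_pos r0 c0 radius h
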